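-- pv_equiv track=rewrite | github.com/catalindanis/University-Stuff | Semester 1/Fundamentele programarii/Laboratoare/Laborator 3/Tema/program.py | secventaMaxElementeInInterval
-- ===== SOURCE A (Python) =====
-- def secventaMaxElementeInInterval(lista):
--     '''
--     Functia cauta secventa de lungime maxima care contine doar elemente din intervalul [0, 10]
--     input  - lista de numere intregi, nevida
--     output - perechea de indici care delimiteaza secventa / (-1, -2) daca nu exista o asemenea secventa
--     '''
--     indexStart = indexStartMax = -1
--     indexFinal = indexFinalMax = -2
--     for index in range(len(lista)):
--         if lista[index] >= 0 and lista[index] <= 10: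
--             if indexStart == -1:
--                 indexStart = index
--             indexFinal = index
--         else:
--             indexStart = -1
--             indexFinal = -2
--
--         if indexFinal - indexStart + 1 > indexFinalMax - indexStartMax + 1:
--             indexFinalMax = indexFinal
--             indexStartMax = indexStart
--     return (indexStartMax, indexFinalMax)
-- ===== SOURCE B (Python) =====
-- def secventaMaxElementeInInterval(lista):
--     '''
--     Collect-then-select: first build the list of maximal runs of values in
--     [0, 10] as (start, end) pairs, then pick the longest run (earliest on
--     ties); the no-run sentinel if there is no such run.
--     '''
--     segments = []
--     start = None
--     for index, value in enumerate(lista):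
--         if 0 <= value <= 10:
--             if start is None:
--                 start = index
--         else:
--             if start is not None:
--                 segments.append((start, index - 1))
--                 start = None
--     if start is not None:
--         segments.append((start, len(lista) - 1))
--     if not segments:
--         return (-1, -2)
--     best = segments[0]
--     for seg in segments[1:]:
--         if seg[1] - seg[0] > best[1] - best[0]:
--             best = seg
--     return best
-- ===== Notes on version B (the rewrite author's own statement) =====
-- stated objective: alternative
-- what changed: A interleaves run tracking with a running best-comparison in one loop; B first collects all maximal in-range runs as (start,end) segments in one pass and then selects the longest (earliest on ties) in a second pass, with the no-run sentinel returned only when the segment list is empty.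
import Mathlib
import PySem

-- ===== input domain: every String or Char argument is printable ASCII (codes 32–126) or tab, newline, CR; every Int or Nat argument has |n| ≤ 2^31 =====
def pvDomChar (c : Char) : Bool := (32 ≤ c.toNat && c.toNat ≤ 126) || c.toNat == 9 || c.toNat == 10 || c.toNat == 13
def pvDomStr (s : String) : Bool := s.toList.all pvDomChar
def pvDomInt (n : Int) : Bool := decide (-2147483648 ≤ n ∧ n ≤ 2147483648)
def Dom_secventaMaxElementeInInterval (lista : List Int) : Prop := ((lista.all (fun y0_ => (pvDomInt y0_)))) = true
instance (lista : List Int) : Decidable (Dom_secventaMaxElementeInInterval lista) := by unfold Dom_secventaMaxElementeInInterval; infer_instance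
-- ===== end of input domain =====

-- B restructures A's single interleaved loop into collect-all-maximal-runs then select-longest; objective: alternative decomposition (same O(n) cost).

-- ===== PORT A =====
-- A's `for index in range(len(lista))` with `lista[index]` ported as structural
-- recursion over the list carrying the current index; same state, same branches.
def pvALoop : List Int → Int → Int × Int × Int × Int → Int × Int × Int × Int
  | [], _, st => st
  | x :: xs, index, (iS, iSM, iF, iFM) =>
    let p : Int × Int :=
      if 0 ≤ x ∧ x ≤ 10 then ((if iS = -1 then index else iS), index)
      else (-1, -2)
    let q : Int × Int :=
      if p.2 - p.1 + 1 > iFM - iSM + 1 then (p.1, p.2) else (iSM, iFM)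
    pvALoop xs (index + 1) (p.1, q.1, p.2, q.2)

def secventaMaxElementeInInterval (lista : List Int) : Int × Int :=
  let st := pvALoop lista 0 (-1, -1, -2, -2)
  (st.2.1, st.2.2.2)

-- ===== PORT B =====
-- first pass: collect the maximal in-range runs as (start, end) segments
def pvCollect : List Int → Int → Option Int → List (Int × Int) → List (Int × Int)
  | [], i, op, segs =>
    match op with
    | none => segs
    | some s => segs ++ [(s, i - 1)]
  | x :: xs, i, op, segs =>
    if 0 ≤ x ∧ x ≤ 10 then
      match op with
      | none => pvCollect xs (i + 1) (some i) segs
      | some s => pvCollect xs (i + 1) (some s) segs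
    else
      match op with
      | none => pvCollect xs (i + 1) none segs
      | some s => pvCollect xs (i + 1) none (segs ++ [(s, i - 1)])

-- second pass: earliest longest segment, (-1, -2) when there is none
def pvSelect : List (Int × Int) → Int × Int
  | [] => (-1, -2)
  | b :: rest => rest.foldl (fun best seg => if seg.2 - seg.1 > best.2 - best.1 then seg else best) b

def secventaMaxElementeInInterval_alt (lista : List Int) : Int × Int :=
  pvSelect (pvCollect lista 0 none [])

-- ===== PRECONDITION & SPEC =====
def Spec_secventaMaxElementeInInterval (lista : List Int) (out : Int × Int) : Prop := out = secventaMaxElementeInInterval_alt lista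
instance (lista : List Int) (out : Int × Int) : Decidable (Spec_secventaMaxElementeInInterval lista out) := by unfold Spec_secventaMaxElementeInInterval; infer_instance

-- ===== CLAIM (what is proved, stated in full; the proofs are below) =====
def Claim_equal_secventaMaxElementeInInterval : Prop := ∀ (lista : List Int), Dom_secventaMaxElementeInInterval lista → Spec_secventaMaxElementeInInterval lista (secventaMaxElementeInInterval lista)

-- ===== LEMMAS AND PROOFS =====

-- pvSelect of a list with a last element of length ≥ 1 is one comparison step on the rest
lemma pvSelect_append (L : List (Int × Int)) (e : Int × Int) (he : e.1 ≤ e.2) :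
    pvSelect (L ++ [e]) =
      (if e.2 - e.1 > (pvSelect L).2 - (pvSelect L).1 then e else pvSelect L) := by
  cases L with
  | nil => simp [pvSelect]; intro h; omega
  | cons b r => simp [pvSelect, List.foldl_append]

-- pvSelect returns an element of the list or the sentinel
lemma pvSelect_mem (L : List (Int × Int)) : pvSelect L ∈ L ∨ pvSelect L = (-1, -2) := by
  cases L with
  | nil => right; rfl
  | cons b r =>
    left
    suffices h : ∀ (r : List (Int × Int)) (acc : Int × Int) (L' : List (Int × Int)),
        acc ∈ L' → (∀ x ∈ r, x ∈ L') →
        r.foldl (fun best seg => if seg.2 - seg.1 > best.2 - best.1 then seg else best) acc ∈ L' by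
      exact h r b (b :: r) (by simp) (by intro x hx; simp [hx])
    intro r
    induction r with
    | nil => intro acc L' h _; exact h
    | cons y ys ih =>
      intro acc L' hacc hall
      simp only [List.foldl_cons]
      apply ih
      · split
        · exact hall y (by simp)
        · exact hacc
      · intro x hx; exact hall x (by simp [hx])

-- the selected segment has end - start ≥ -1 when every segment has length ≥ 1
lemma pvSelect_len (L : List (Int × Int)) (h : ∀ e ∈ L, e.1 ≤ e.2) :
    (pvSelect L).2 - (pvSelect L).1 ≥ -1 := by
  rcases pvSelect_mem L with hm | hs
  · have := h _ hm; omega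
  · rw [hs]; omega

-- main invariant: A's loop state ↔ collected segments + open run
lemma pv_main : ∀ (xs : List Int) (i : Int) (segs : List (Int × Int)) (op : Option Int)
    (iS iF iSM iFM : Int),
    0 ≤ i →
    (∀ e ∈ segs, e.1 ≤ e.2) →
    (match op with
      | none => iS = -1 ∧ iF = -2
      | some s => 0 ≤ s ∧ s ≤ i - 1 ∧ iS = s ∧ iF = i - 1) →
    (iSM, iFM) = pvSelect (segs ++ (match op with | none => [] | some s => [(s, i - 1)])) →
    (let st := pvALoop xs i (iS, iSM, iF, iFM); (st.2.1, st.2.2.2)) =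
      pvSelect (pvCollect xs i op segs) := by
  intro xs
  induction xs with
  | nil =>
    intro i segs op iS iF iSM iFM hi hsegs hop hbest
    cases op with
    | none => simpa [pvALoop, pvCollect] using hbest
    | some s => simpa [pvALoop, pvCollect] using hbest
  | cons x xs ih =>
    intro i segs op iS iF iSM iFM hi hsegs hop hbest
    by_cases hx : 0 ≤ x ∧ x ≤ 10
    · cases op with
      | none =>
        obtain ⟨hiS, hiF⟩ := hop
        subst hiS; subst hiF
        rw [List.append_nil] at hbest
        have hstep : pvSelect (segs ++ [(i, i)]) =
            (if (i : Int) - i > iFM - iSM then (i, i) else (iSM, iFM)) := by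
          rw [pvSelect_append segs (i, i) (by simp), ← hbest]
        have hcol : pvCollect (x :: xs) i none segs = pvCollect xs (i + 1) (some i) segs := by
          simp [pvCollect, hx]
        rw [hcol]
        simp only [pvALoop, if_pos hx]
        exact ih (i + 1) segs (some i) i i _ _ (by omega) hsegs
          ⟨by omega, by omega, rfl, by omega⟩
          (by
            rw [show (i : Int) + 1 - 1 = i by omega, hstep]
            split_ifs <;> first | rfl | omega)
      | some s =>
        obtain ⟨hs0, hsi, hiS, hiF⟩ := hop
        subst hiS; subst hiF
        have hstep1 : pvSelect (segs ++ [(iS, i - 1)]) =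
            (if (i : Int) - 1 - iS > (pvSelect segs).2 - (pvSelect segs).1
              then (iS, i - 1) else pvSelect segs) :=
          pvSelect_append segs (iS, i - 1) (by simpa using by omega)
        have hstep2 : pvSelect (segs ++ [(iS, i)]) =
            (if (i : Int) - iS > (pvSelect segs).2 - (pvSelect segs).1
              then (iS, i) else pvSelect segs) :=
          pvSelect_append segs (iS, i) (by simpa using by omega)
        have hkey : pvSelect (segs ++ [(iS, i)]) =
            (if (i : Int) - iS > iFM - iSM then (iS, i) else (iSM, iFM)) := by
          have hB1' := hbest.trans hstep1
          rw [hstep2]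
          rcases hps : pvSelect segs with ⟨b1, b2⟩
          rw [hps] at hB1'
          split_ifs at hB1' <;>
            simp only [Prod.mk.injEq] at hB1' <;>
            obtain ⟨h1, h2⟩ := hB1' <;> subst h1 <;> subst h2 <;>
            split_ifs <;> first | rfl | omega
        have hcol : pvCollect (x :: xs) i (some iS) segs = pvCollect xs (i + 1) (some iS) segs := by
          simp [pvCollect, hx]
        rw [hcol]
        simp only [pvALoop, if_pos hx, if_neg (show ¬ iS = -1 by omega)]
        exact ih (i + 1) segs (some iS) iS i _ _ (by omega) hsegs
          ⟨by omega, by omega, rfl, by omega⟩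
          (by
            rw [show (i : Int) + 1 - 1 = i by omega, hkey]
            split_ifs <;> first | rfl | omega)
    · cases op with
      | none =>
        obtain ⟨hiS, hiF⟩ := hop
        subst hiS; subst hiF
        rw [List.append_nil] at hbest
        have hlen := pvSelect_len segs hsegs
        rw [← hbest] at hlen
        have hcol : pvCollect (x :: xs) i none segs = pvCollect xs (i + 1) none segs := by
          simp [pvCollect, hx]
        rw [hcol]
        simp only [pvALoop, if_neg hx, if_neg (show ¬ ((-2 : Int) - -1 + 1 > iFM - iSM + 1) by omega)]
        exact ih (i + 1) segs none (-1) (-2) iSM iFM (by omega) hsegs ⟨rfl, rfl⟩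
          (by simpa using hbest)
      | some s =>
        obtain ⟨hs0, hsi, hiS, hiF⟩ := hop
        subst hiS; subst hiF
        have hsegs' : ∀ e ∈ segs ++ [(iS, i - 1)], e.1 ≤ e.2 := by
          intro e he
          rcases List.mem_append.mp he with h | h
          · exact hsegs e h
          · simp at h; subst h; simpa using by omega
        have hlen := pvSelect_len _ hsegs'
        rw [← hbest] at hlen
        have hcol : pvCollect (x :: xs) i (some iS) segs =
            pvCollect xs (i + 1) none (segs ++ [(iS, i - 1)]) := by
          simp [pvCollect, hx]
        rw [hcol]
        simp only [pvALoop, if_neg hx, if_neg (show ¬ ((-2 : Int) - -1 + 1 > iFM - iSM + 1) by omega)]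
        exact ih (i + 1) (segs ++ [(iS, i - 1)]) none (-1) (-2) iSM iFM (by omega)
          hsegs' ⟨rfl, rfl⟩ (by simpa using hbest)

-- ===== VERDICT (by name: the statement is the Claim_ definition above) =====
theorem secventaMaxElementeInInterval_spec : Claim_equal_secventaMaxElementeInInterval := by
  intro lista _
  unfold Spec_secventaMaxElementeInInterval secventaMaxElementeInInterval secventaMaxElementeInInterval_alt
  exact pv_main lista 0 [] none (-1) (-2) (-1) (-2) le_rfl (by simp) ⟨rfl, rfl⟩ (by rfl)
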